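-- pv_equiv track=rewrite | github.com/microsoft/CodeBERT | CodeExecutor/downstream/run.py | get_output_from_trace
-- ===== SOURCE A (Python) =====
-- def get_output_from_trace(text):
--     output_list = []
--     parse_loc = []
--     start_len = 0
--     while True:
--         num = text.find("<line>",start_len)
--         if num == -1: break
--         parse_loc.append(num)
--         start_len = num + 1
--     start_len = 0
--     while True:
--         num = text.find("<output>",start_len)
--         if num == -1: break
--         parse_loc.append(num)
--         start_len = num + 1
--     # add 0 and len(text)
--     parse_loc.append(0)
--     parse_loc.append(len(text))
--     parse_loc = list(set(parse_loc))
--     parse_loc.sort()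
--
--     for i, loc in enumerate(parse_loc):
--         if i == 0: continue
--         # delete the last incomplete sentence in gold
--         if i == len(parse_loc)-1:
--             if "</state>" not in text[parse_loc[i-1]:loc]:
--                 continue
--         if "<output>" in text[parse_loc[i-1]:loc]:
--             my_output = text[parse_loc[i-1]+len("<output> "):loc].strip()
--             if "_____event" in my_output:
--                 my_output = my_output[0:my_output.find("_____event")].strip()
--             if len(my_output) > 0:
--                 output_list.append(my_output)
--     return output_list
-- ===== SOURCE B (Python) =====
-- def _flush(text, seg, end, res):
--     s = text[seg + 9:end].strip()
--     k = s.find("_____event")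
--     if k != -1:
--         s = s[:k].strip()
--     if s:
--         res.append(s)
--
--
-- def get_output_from_trace(text):
--     # one-pass state machine: seg holds the start of the currently open
--     # <output> segment (or None); outputs are emitted on the fly at the next
--     # tag, and the pending segment at end-of-text only if it has "</state>".
--     n = len(text)
--     res = []
--     seg = None
--     i = 0
--     while i < n:
--         if text.startswith("<line>", i):
--             if seg is not None:
--                 _flush(text, seg, i, res)
--                 seg = None
--         elif text.startswith("<output>", i):
--             if seg is not None:
--                 _flush(text, seg, i, res)
--             seg = i
--         i += 1
--     if seg is not None and "</state>" in text[seg:]: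
--         _flush(text, seg, n, res)
--     return res
-- ===== Notes on version B (the rewrite author's own statement) =====
-- stated objective: alternative
-- what changed: B replaces A's staged pipeline (two repeated-find passes collecting boundary positions, set-dedup, sort, then a second pass over enumerated boundary pairs) by a single left-to-right state machine with O(1) state: it keeps only the start of the currently open <output> segment, emits each output on the fly when the next tag is reached, and at end-of-text emits the pending segment only if it contains </state> — no boundary list is ever built.
import Mathlib
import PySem

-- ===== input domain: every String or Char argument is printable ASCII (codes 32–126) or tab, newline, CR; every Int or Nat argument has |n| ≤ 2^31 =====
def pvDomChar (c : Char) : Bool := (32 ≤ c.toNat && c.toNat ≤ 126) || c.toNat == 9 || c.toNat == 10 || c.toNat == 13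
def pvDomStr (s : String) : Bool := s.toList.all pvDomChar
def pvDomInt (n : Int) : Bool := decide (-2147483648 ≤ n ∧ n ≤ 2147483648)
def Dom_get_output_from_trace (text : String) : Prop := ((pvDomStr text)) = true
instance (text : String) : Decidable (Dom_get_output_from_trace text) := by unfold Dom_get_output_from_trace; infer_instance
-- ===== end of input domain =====

-- B replaces A's staged pipeline (two find-loops collecting boundary positions, set-dedup, sort,
-- then a pass over boundary pairs) by a single left-to-right state machine with O(1) state
-- (the start of the currently open <output> segment), emitting outputs on the fly.

-- ===== PORT A =====
-- while True: num = text.find(sub, start_len); if num == -1: break; append; start_len = num+1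
-- (the fuel argument len(text)+1 only makes the loop total; each found index strictly increases,
--  so at most len(text)+1 iterations can ever happen and the fuel never runs out)
def pvFindAll (cs sub : List Char) (start : Nat) : Nat → List Int
  | 0 => []
  | fuel+1 =>
    let num := PySem.Chars.findFrom cs sub (start : Int)
    if num = -1 then [] else num :: pvFindAll cs sub (num.toNat + 1) fuel

def get_output_from_trace (text : String) : List String :=
  let cs := text.toList
  let parse_loc := pvFindAll cs "<line>".toList 0 (cs.length + 1)
    ++ pvFindAll cs "<output>".toList 0 (cs.length + 1)
    ++ [0, (cs.length : Int)]                      -- parse_loc.append(0); parse_loc.append(len(text))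
  let parse_loc := PySem.List.sorted (PySem.Set.ofList parse_loc) id   -- list(set(..)); .sort()
  (PySem.List.enumerate parse_loc).foldl (fun output_list (iloc : Int × Int) =>
    let i := iloc.1; let loc := iloc.2
    if i = 0 then output_list
    else if i = (parse_loc.length : Int) - 1
            ∧ PySem.Chars.isIn "</state>".toList
                (PySem.Chars.slice cs (some (PySem.List.pyGetD parse_loc (i-1) 0)) (some loc)) = false
    then output_list
    else if PySem.Chars.isIn "<output>".toList
              (PySem.Chars.slice cs (some (PySem.List.pyGetD parse_loc (i-1) 0)) (some loc)) then
      -- len("<output> ") = 9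
      let my_output := PySem.Chars.strip
        (PySem.Chars.slice cs (some (PySem.List.pyGetD parse_loc (i-1) 0 + 9)) (some loc))
      let my_output := if PySem.Chars.isIn "_____event".toList my_output then
          PySem.Chars.strip (PySem.Chars.slice my_output (some 0)
            (some (PySem.Chars.find my_output "_____event".toList)))
        else my_output
      if my_output.length > 0 then output_list ++ [String.ofList my_output] else output_list
    else output_list) []

-- ===== PORT B =====
-- helper _flush(text, seg, end, res) of Source B
def pvFlush (cs : List Char) (seg e : Nat) (res : List String) : List String :=
  let s := PySem.Chars.strip (PySem.Chars.slice cs (some ((seg : Int) + 9)) (some (e : Int)))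
  let k := PySem.Chars.find s "_____event".toList
  let s := if k ≠ -1 then PySem.Chars.strip (PySem.Chars.slice s none (some k)) else s
  if s.length > 0 then res ++ [String.ofList s] else res

-- one pass i = 0..n-1 with state (res, seg); then the end-of-text flush guarded by "</state>"
def get_output_from_trace_alt (text : String) : List String :=
  let cs := text.toList
  let n := cs.length
  let st := (List.range n).foldl (fun (st : List String × Option Nat) i =>
    if PySem.Chars.startswith (cs.drop i) "<line>".toList then
      match st.2 with
      | some p => (pvFlush cs p i st.1, none)
      | none => st
    else if PySem.Chars.startswith (cs.drop i) "<output>".toList then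
      match st.2 with
      | some p => (pvFlush cs p i st.1, some i)
      | none => (st.1, some i)
    else st) ([], none)
  match st.2 with
  | some p =>
    if PySem.Chars.isIn "</state>".toList (PySem.Chars.slice cs (some (p : Int)) none) then
      pvFlush cs p n st.1
    else st.1
  | none => st.1

-- ===== PRECONDITION & SPEC =====
def Spec_get_output_from_trace (text : String) (out : List String) : Prop := out = get_output_from_trace_alt text
instance (text : String) (out : List String) : Decidable (Spec_get_output_from_trace text out) := by unfold Spec_get_output_from_trace; infer_instance

-- ===== CLAIM (what is proved, stated in full; the proofs are below) =====
def Claim_equal_get_output_from_trace : Prop := ∀ (text : String), Dom_get_output_from_trace text → Spec_get_output_from_trace text (get_output_from_trace text)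

-- ===== LEMMAS AND PROOFS =====

-- proof-side vocabulary
def pvTag (cs : List Char) (i : Nat) : Bool :=
  PySem.Chars.startswith (cs.drop i) "<line>".toList
  || PySem.Chars.startswith (cs.drop i) "<output>".toList

def pvOccsOf (cs sub : List Char) : List Nat :=
  (List.range cs.length).filter (fun i => PySem.Chars.startswith (cs.drop i) sub)

lemma pvTag_lt {cs : List Char} {i : Nat} (h : pvTag cs i = true) : i < cs.length := by
  simp only [pvTag, Bool.or_eq_true, PySem.Chars.startswith_iff] at h
  rcases h with h | h <;>
    · have := h.length_le
      simp [List.length_drop] at this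
      omega

lemma pvOut_le {cs : List Char} {p : Nat}
    (h : "<output>".toList <+: cs.drop p) : p + 8 ≤ cs.length := by
  have := h.length_le
  simp [List.length_drop] at this
  omega

lemma pvNoOverlap {cs : List Char} {p q : Nat}
    (hout : "<output>".toList <+: cs.drop p) (h1 : p < q) (h2 : q < p + 8) :
    pvTag cs q = false := by
  obtain ⟨t, ht⟩ := hout
  have hcq : cs[q]? = "<output>".toList[q - p]? := by
    have h3 : ("<output>".toList ++ t)[q - p]? = "<output>".toList[q - p]? :=
      List.getElem?_append_left (by simp; omega)
    rw [← h3, ht]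
    rw [List.getElem?_drop]
    congr 1
    omega
  by_contra hcon
  simp only [Bool.not_eq_false] at hcon
  have hlt : cs[q]? = some '<' := by
    simp only [pvTag, Bool.or_eq_true, PySem.Chars.startswith_iff] at hcon
    have h5 : cs[q]? = (cs.drop q)[0]? := by
      rw [List.getElem?_drop]; congr 1
    rcases hcon with h | h <;>
    · obtain ⟨t2, ht2⟩ := h
      rw [h5, ← ht2]
      rfl
  rw [hlt] at hcq
  have h6 : q - p < 8 := by omega
  have h7 : 0 < q - p := by omega
  interval_cases h : (q - p) <;> simp_all

lemma pvSegOut {cs : List Char} {p e : Nat} (_hpe : p < e) (_hen : e ≤ cs.length)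
    (hno : ∀ j, p < j → j < e → pvTag cs j = false)
    (hlen : PySem.Chars.startswith (cs.drop p) "<output>".toList = true → p + 8 ≤ e) :
    PySem.Chars.isIn "<output>".toList
        (PySem.Chars.slice cs (some (p : Int)) (some (e : Int)))
      = PySem.Chars.startswith (cs.drop p) "<output>".toList := by
  rw [PySem.Chars.slice_eq_listSlice, PySem.List.slice_natCast]
  cases hb : PySem.Chars.startswith (cs.drop p) "<output>".toList with
  | true =>
    rw [← PySem.Chars.exists_prefix_drop_iff_isIn]
    refine ⟨0, ?_⟩
    rw [List.drop_zero, List.prefix_take_iff]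
    exact ⟨(PySem.Chars.startswith_iff _ _).mp hb, by have := hlen hb; simp; omega⟩
  | false =>
    rw [PySem.Chars.isIn_eq_false_iff]
    intro hinf
    have hex : ∃ j, "<output>".toList <+: (List.take (e - p) (List.drop p cs)).drop j := by
      rcases hinf with ⟨s₁, s₂, hs⟩
      exact ⟨s₁.length, by rw [← hs, List.append_assoc, List.drop_left]; exact List.prefix_append _ _⟩
    obtain ⟨j, hj⟩ := hex
    rw [List.drop_take, List.drop_drop] at hj
    rw [List.prefix_take_iff] at hj
    obtain ⟨hj1, hj2⟩ := hj
    rcases Nat.eq_zero_or_pos j with hj0 | hj0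
    · subst hj0
      simp only [Nat.add_zero] at hj1
      have := (PySem.Chars.startswith_iff _ _).mpr hj1
      rw [hb] at this
      simp at this
    · have h1 : pvTag cs (p + j) = true := by
        simp only [pvTag, Bool.or_eq_true]
        exact Or.inr ((PySem.Chars.startswith_iff _ _).mpr hj1)
      have h2 := hno (p + j) (by omega) (by simp at hj2; omega)
      rw [h1] at h2
      simp at h2

def pvEmit (cs : List Char) (p e : Int) (acc : List String) : List String :=
  let out := PySem.Chars.strip (PySem.Chars.slice cs (some (p + 9)) (some e))
  let out := if PySem.Chars.isIn "_____event".toList out then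
      PySem.Chars.strip (PySem.Chars.slice out (some 0)
        (some (PySem.Chars.find out "_____event".toList)))
    else out
  if out.length > 0 then acc ++ [String.ofList out] else acc

def pvStepA (cs : List Char) (prev loc : Int) (last : Bool) (acc : List String) : List String :=
  if last = true ∧ PySem.Chars.isIn "</state>".toList
      (PySem.Chars.slice cs (some prev) (some loc)) = false then acc
  else if PySem.Chars.isIn "<output>".toList
      (PySem.Chars.slice cs (some prev) (some loc)) then pvEmit cs prev loc acc
  else acc

def pvStepB (cs : List Char) (p e : Nat) (acc : List String) : List String :=
  if PySem.Chars.startswith (cs.drop p) "<output>".toList then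
    if e = cs.length ∧ PySem.Chars.isIn "</state>".toList (cs.drop p) = false then acc
    else pvFlush cs p e acc
  else acc

-- B's flush is A's emit expression
lemma pvSliceZero (out : List Char) {j : Int} (hnn : 0 ≤ j) :
    PySem.Chars.slice out (some 0) (some j) = PySem.Chars.slice out none (some j) := by
  rw [PySem.Chars.slice_eq_listSlice, PySem.Chars.slice_eq_listSlice]
  rw [PySem.List.slice_to _ hnn]
  rw [show (0:Int) = ((0:Nat):Int) by simp, show j = ((j.toNat : Nat) : Int) by omega]
  rw [PySem.List.slice_natCast]
  simp
  omega

lemma pvFlush_eq (cs : List Char) (p e : Nat) (acc : List String) :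
    pvFlush cs p e acc = pvEmit cs (p : Int) (e : Int) acc := by
  simp only [pvFlush, pvEmit]
  by_cases hin : "_____event".toList <:+:
      PySem.Chars.strip (PySem.Chars.slice cs (some ((p:Int) + 9)) (some (e:Int)))
  · have h1 : PySem.Chars.find (PySem.Chars.strip (PySem.Chars.slice cs (some ((p:Int) + 9)) (some (e:Int)))) "_____event".toList ≠ -1 :=
      (PySem.Chars.find_ne_neg_one_iff _ _).mpr hin
    have h2 : PySem.Chars.isIn "_____event".toList (PySem.Chars.strip (PySem.Chars.slice cs (some ((p:Int) + 9)) (some (e:Int)))) = true :=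
      (PySem.Chars.isIn_iff_infix _ _).mpr hin
    have hnn : (0:Int) ≤ PySem.Chars.find (PySem.Chars.strip (PySem.Chars.slice cs (some ((p:Int) + 9)) (some (e:Int)))) "_____event".toList :=
      (PySem.Chars.find_nonneg_iff _ _).mpr hin
    rw [if_pos h1, if_pos h2, pvSliceZero _ hnn]
  · have h1 : ¬ (PySem.Chars.find (PySem.Chars.strip (PySem.Chars.slice cs (some ((p:Int) + 9)) (some (e:Int)))) "_____event".toList ≠ -1) := by
      simpa [PySem.Chars.find_ne_neg_one_iff] using hin
    have h2 : ¬ (PySem.Chars.isIn "_____event".toList (PySem.Chars.strip (PySem.Chars.slice cs (some ((p:Int) + 9)) (some (e:Int)))) = true) := by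
      simpa [PySem.Chars.isIn_iff_infix] using hin
    rw [if_neg h1, if_neg h2]

lemma pvStepInterior {cs : List Char} {p e : Nat} (acc : List String)
    (hpe : p < e) (he : pvTag cs e = true)
    (hno : ∀ j, p < j → j < e → pvTag cs j = false) :
    pvStepA cs (p : Int) (e : Int) false acc = pvStepB cs p e acc := by
  have hen : e < cs.length := pvTag_lt he
  have hlen : PySem.Chars.startswith (cs.drop p) "<output>".toList = true → p + 8 ≤ e := by
    intro hb
    by_contra hcon
    have := pvNoOverlap ((PySem.Chars.startswith_iff _ _).mp hb) hpe (by omega)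
    rw [he] at this
    simp at this
  have hseg := pvSegOut hpe hen.le hno hlen
  simp only [pvStepA, Bool.false_eq_true, false_and, if_false, hseg]
  simp only [pvStepB]
  cases hb : PySem.Chars.startswith (cs.drop p) "<output>".toList with
  | false => simp
  | true =>
    simp only [if_pos]
    rw [if_neg (by rintro ⟨h1, -⟩; omega)]
    rw [pvFlush_eq]

lemma pvStepLast {cs : List Char} {p : Nat} (acc : List String)
    (hpn : p < cs.length)
    (hno : ∀ j, p < j → j < cs.length → pvTag cs j = false) :
    pvStepA cs (p : Int) (cs.length : Int) true acc = pvStepB cs p cs.length acc := by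
  have hslice : PySem.Chars.slice cs (some (p : Int)) (some (cs.length : Int)) = cs.drop p := by
    rw [PySem.Chars.slice_eq_listSlice, PySem.List.slice_natCast]
    exact List.take_of_length_le (by simp)
  have hlen : PySem.Chars.startswith (cs.drop p) "<output>".toList = true → p + 8 ≤ cs.length :=
    fun hb => pvOut_le ((PySem.Chars.startswith_iff _ _).mp hb)
  have hseg := pvSegOut hpn le_rfl hno hlen
  rw [hslice] at hseg
  simp only [pvStepA, pvStepB, hslice, hseg]
  cases hst : PySem.Chars.isIn "</state>".toList (cs.drop p) with
  | false =>
    rw [if_pos ⟨trivial, rfl⟩]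
    cases hb : PySem.Chars.startswith (cs.drop p) "<output>".toList with
    | false => rw [if_neg (by simp)]
    | true => rw [if_pos rfl, if_pos ⟨trivial, rfl⟩]
  | true =>
    rw [if_neg (by simp)]
    cases hb : PySem.Chars.startswith (cs.drop p) "<output>".toList with
    | false => rw [if_neg (by simp), if_neg (by simp)]
    | true =>
      rw [if_pos rfl, if_pos rfl, if_neg (by simp)]
      rw [pvFlush_eq]

lemma pvFirstSeg (cs : List Char) (acc : List String) {e : Nat} (last : Bool)
    (h0 : pvTag cs 0 = false) (he : e ≤ cs.length) (h0e : 0 < e)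
    (hno : ∀ j, 0 < j → j < e → pvTag cs j = false) :
    pvStepA cs ((0:Nat) : Int) (e : Int) last acc = acc := by
  have hb : PySem.Chars.startswith (cs.drop 0) "<output>".toList = false := by
    simp only [pvTag, Bool.or_eq_false_iff] at h0
    exact h0.2
  have hseg := pvSegOut h0e he hno (fun h => by rw [hb] at h; simp at h)
  simp only [pvStepA]
  rw [hseg, hb]
  split <;> rfl

def pvChainA (cs : List Char) : Int → List Int → List String → List String
  | _, [], acc => acc
  | prev, e :: rest, acc => pvChainA cs e rest (pvStepA cs prev e rest.isEmpty acc)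

def pvNext (n : Nat) : List Nat → Nat
  | [] => n
  | q :: _ => q

def pvChainB (cs : List Char) : List Nat → List String → List String
  | [], acc => acc
  | p :: rest, acc =>
      pvChainB cs rest (pvStepB cs p (pvNext cs.length rest) acc)

lemma pvChain_eq (cs : List Char) :
    ∀ (l : List Nat) (p : Nat) (acc : List String),
    p < cs.length →
    l.Pairwise (· < ·) →
    (∀ j ∈ l, p < j ∧ pvTag cs j = true) →
    (∀ j, p < j → j < cs.length → pvTag cs j = true → j ∈ l) →
    pvChainA cs (p : Int) (l.map (fun i : Nat => (i : Int)) ++ [(cs.length : Int)]) acc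
      = pvChainB cs (p :: l) acc := by
  intro l
  induction l with
  | nil =>
    intro p acc hp _ _ hcompl
    simp only [List.map_nil, List.nil_append, pvChainA, pvChainB, List.isEmpty_nil]
    rw [pvStepLast acc hp (fun j h1 h2 => by
      by_contra hc
      simp only [Bool.not_eq_false] at hc
      exact absurd (hcompl j h1 h2 hc) (List.not_mem_nil))]
    rfl
  | cons q l ih =>
    intro p acc hp hpair hmem hcompl
    obtain ⟨hq_all, hl_pair⟩ := List.pairwise_cons.mp hpair
    simp only [List.map_cons, List.cons_append, pvChainA, pvChainB]
    have hq := hmem q (List.mem_cons_self)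
    have hqlt : q < cs.length := pvTag_lt hq.2
    have hnoq : ∀ j, p < j → j < q → pvTag cs j = false := fun j h1 h2 => by
      by_contra hc
      simp only [Bool.not_eq_false] at hc
      rcases List.mem_cons.mp (hcompl j h1 (by omega) hc) with rfl | hmem'
      · omega
      · exact absurd (hq_all j hmem') (by omega)
    have hstep : pvStepA cs (p : Int) (q : Int)
          ((l.map (fun i : Nat => (i : Int)) ++ [(cs.length : Int)]).isEmpty) acc
        = pvStepB cs p q acc := by
      rw [show (l.map (fun i : Nat => (i : Int)) ++ [(cs.length : Int)]).isEmpty = false by simp]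
      exact pvStepInterior acc hq.1 hq.2 hnoq
    rw [hstep]
    exact ih q (pvStepB cs p q acc) hqlt hl_pair
      (fun j hj => ⟨hq_all j hj, (hmem j (List.mem_cons_of_mem _ hj)).2⟩)
      (fun j h1 h2 htag => by
        rcases List.mem_cons.mp (hcompl j (by omega) h2 htag) with rfl | hmem'
        · omega
        · exact hmem')

lemma pvFindAll_eq (cs sub : List Char) (hs : sub ≠ []) :
    ∀ (fuel start : Nat), start ≤ cs.length → cs.length - start < fuel →
    pvFindAll cs sub start fuel
      = ((List.range' start (cs.length - start)).filter
          (fun i => PySem.Chars.startswith (cs.drop i) sub)).map (fun i : Nat => (i : Int)) := by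
  intro fuel
  induction fuel with
  | zero => intro start _ h; omega
  | succ fuel ih =>
    intro start hstart hfuel
    simp only [pvFindAll]
    by_cases hnum : PySem.Chars.findFrom cs sub (start : Int) = -1
    · rw [if_pos hnum]
      have hno : ¬ sub <:+: cs.drop start :=
        (PySem.Chars.findFrom_natCast_eq_neg_one_iff cs sub start hstart).mp hnum
      symm
      simp only [List.map_eq_nil_iff, List.filter_eq_nil_iff]
      intro i hi
      simp only [List.mem_range'_1] at hi
      intro hsw
      exact hno (((PySem.Chars.startswith_iff _ _).mp hsw).isInfix.trans
        (by rw [show cs.drop i = (cs.drop start).drop (i - start) by rw [List.drop_drop]; congr 1; omega]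
            exact (List.drop_suffix _ _).isInfix))
    · rw [if_neg hnum]
      obtain ⟨hle, hpre, hmin⟩ := PySem.Chars.findFrom_natCast_spec cs sub start hstart hnum
      set num := PySem.Chars.findFrom cs sub (start : Int) with hn
      have hnn : 0 ≤ num := le_trans (by omega) hle
      have hsm : start ≤ num.toNat := by omega
      have hmn : num.toNat < cs.length := by
        have h1 := hpre.length_le
        have h2 : 0 < sub.length := List.length_pos_iff.mpr hs
        simp [List.length_drop] at h1
        omega
      have hsplit : List.range' start (cs.length - start)
          = List.range' start (num.toNat - start) ++ List.range' num.toNat (cs.length - num.toNat) := by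
        rw [show cs.length - start = (num.toNat - start) + (cs.length - num.toNat) by omega]
        rw [← List.range'_append]
        congr 2
        omega
      rw [hsplit, List.filter_append]
      have hfilt1 : (List.range' start (num.toNat - start)).filter
          (fun i => PySem.Chars.startswith (cs.drop i) sub) = [] := by
        simp only [List.filter_eq_nil_iff]
        intro i hi hsw
        simp only [List.mem_range'_1] at hi
        exact hmin i hi.1 (by omega) ((PySem.Chars.startswith_iff _ _).mp hsw)
      rw [hfilt1, List.nil_append]
      rw [show cs.length - num.toNat = (cs.length - num.toNat - 1) + 1 by omega, List.range'_succ]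
      rw [List.filter_cons_of_pos (by exact (PySem.Chars.startswith_iff _ _).mpr hpre)]
      rw [List.map_cons]
      rw [ih (num.toNat + 1) (by omega) (by omega)]
      congr 2
      omega

lemma pvFindAll_zero (cs sub : List Char) (hs : sub ≠ []) :
    pvFindAll cs sub 0 (cs.length + 1) = (pvOccsOf cs sub).map (fun i : Nat => (i : Int)) := by
  rw [pvFindAll_eq cs sub hs (cs.length + 1) 0 (by omega) (by omega)]
  simp [pvOccsOf, List.range_eq_range']

def pvOccs (cs : List Char) : List Nat := (List.range cs.length).filter (pvTag cs)

def pvBnds (cs : List Char) : List Nat :=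
  (if pvTag cs 0 then [] else [0]) ++ pvOccs cs ++ [cs.length]

lemma pvOccs_pairwise (cs : List Char) : (pvOccs cs).Pairwise (· < ·) :=
  List.Pairwise.sublist List.filter_sublist List.pairwise_lt_range

lemma pvMem_occs {cs : List Char} {i : Nat} :
    i ∈ pvOccs cs ↔ pvTag cs i = true := by
  constructor
  · intro h
    exact (List.mem_filter.mp h).2
  · intro h
    exact List.mem_filter.mpr ⟨List.mem_range.mpr (pvTag_lt h), h⟩

lemma pvMem_occsOf {cs sub : List Char} {i : Nat} (hs : sub ≠ []) :
    i ∈ pvOccsOf cs sub ↔ PySem.Chars.startswith (cs.drop i) sub = true := by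
  constructor
  · intro h
    exact (List.mem_filter.mp h).2
  · intro h
    refine List.mem_filter.mpr ⟨List.mem_range.mpr ?_, h⟩
    have h1 := ((PySem.Chars.startswith_iff _ _).mp h).length_le
    have h2 : 0 < sub.length := List.length_pos_iff.mpr hs
    simp [List.length_drop] at h1
    omega

lemma pvBnds_pairwise (cs : List Char) (h : 0 < cs.length) :
    (pvBnds cs).Pairwise (· < ·) := by
  unfold pvBnds
  have hocc := pvOccs_pairwise cs
  have hlt : ∀ j ∈ pvOccs cs, j < cs.length := fun j hj => pvTag_lt (pvMem_occs.mp hj)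
  by_cases h0 : pvTag cs 0 = true
  · rw [if_pos h0, List.nil_append]
    rw [List.pairwise_append]
    exact ⟨hocc, List.pairwise_singleton _ _,
      fun a ha b hb => by simp at hb; subst hb; exact hlt a ha⟩
  · rw [if_neg h0]
    simp only [List.cons_append, List.nil_append]
    rw [List.pairwise_cons, List.pairwise_append]
    refine ⟨?_, hocc, List.pairwise_singleton _ _,
      fun a ha b hb => by simp at hb; subst hb; exact hlt a ha⟩
    intro j hj
    rcases List.mem_append.mp hj with hj | hj
    · have := pvMem_occs.mp hj
      rcases Nat.eq_zero_or_pos j with rfl | hpos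
      · exact absurd this h0
      · exact hpos
    · simp at hj; omega

lemma pvMem_bnds {cs : List Char} {i : Nat} (_h : 0 < cs.length) :
    i ∈ pvBnds cs ↔ (i = 0 ∨ pvTag cs i = true ∨ i = cs.length) := by
  unfold pvBnds
  by_cases h0 : pvTag cs 0 = true
  · rw [if_pos h0, List.nil_append]
    simp only [List.mem_append, List.mem_singleton, pvMem_occs]
    constructor
    · rintro (ht | rfl)
      · exact Or.inr (Or.inl ht)
      · exact Or.inr (Or.inr rfl)
    · rintro (rfl | ht | rfl)
      · exact Or.inl h0
      · exact Or.inl ht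
      · exact Or.inr rfl
  · rw [if_neg h0]
    simp only [List.cons_append, List.nil_append, List.mem_cons, List.mem_append,
      pvMem_occs]
    tauto

lemma pvSorted_eq (cs : List Char) (h : 0 < cs.length) :
    PySem.List.sorted (PySem.Set.ofList
      ((pvOccsOf cs "<line>".toList).map (fun i : Nat => (i : Int))
        ++ (pvOccsOf cs "<output>".toList).map (fun i : Nat => (i : Int))
        ++ [0, (cs.length : Int)])) id
    = (pvBnds cs).map (fun i : Nat => (i : Int)) := by
  apply PySem.List.sorted_eq_of_perm_of_pairwise_lt
  · rw [List.perm_ext_iff_of_nodup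
      (List.Nodup.map (fun a b hab => by omega) ((pvBnds_pairwise cs h).imp Nat.ne_of_lt))
      (PySem.Set.nodup_ofList _)]
    intro a
    rw [PySem.Set.mem_ofList]
    constructor
    · intro ha
      obtain ⟨i, hi, rfl⟩ := List.mem_map.mp ha
      rcases (pvMem_bnds h).mp hi with rfl | htag | rfl
      · simp
      · rcases Bool.or_eq_true _ _ |>.mp htag with hsw | hsw
        · exact List.mem_append.mpr (Or.inl (List.mem_append.mpr (Or.inl
            (List.mem_map.mpr ⟨i, (pvMem_occsOf (by decide)).mpr hsw, rfl⟩))))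
        · exact List.mem_append.mpr (Or.inl (List.mem_append.mpr (Or.inr
            (List.mem_map.mpr ⟨i, (pvMem_occsOf (by decide)).mpr hsw, rfl⟩))))
      · simp
    · intro ha
      rcases List.mem_append.mp ha with ha | ha
      · rcases List.mem_append.mp ha with ha | ha <;>
        · obtain ⟨i, hi, rfl⟩ := List.mem_map.mp ha
          refine List.mem_map.mpr ⟨i, (pvMem_bnds h).mpr (Or.inr (Or.inl ?_)), rfl⟩
          simp only [pvTag, Bool.or_eq_true]
          first
            | exact Or.inl ((pvMem_occsOf (by decide)).mp hi)
            | exact Or.inr ((pvMem_occsOf (by decide)).mp hi)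
      · rcases List.mem_cons.mp ha with rfl | ha
        · exact List.mem_map.mpr ⟨0, (pvMem_bnds h).mpr (Or.inl rfl), by simp⟩
        · rcases List.mem_singleton.mp ha with rfl
          exact List.mem_map.mpr ⟨cs.length, (pvMem_bnds h).mpr (Or.inr (Or.inr rfl)), rfl⟩
  · rw [List.pairwise_map]
    exact (pvBnds_pairwise cs h).imp (fun hab => by simpa using hab)

lemma pvFoldA (cs : List Char) (pl : List Int) :
    ∀ (d : List Int) (k : Nat) (acc : List String), 1 ≤ k → d = pl.drop k →
    (PySem.List.enumerate d (k : Int)).foldl (fun output_list (iloc : Int × Int) =>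
      let i := iloc.1; let loc := iloc.2
      if i = 0 then output_list
      else if i = (pl.length : Int) - 1
              ∧ PySem.Chars.isIn "</state>".toList
                  (PySem.Chars.slice cs (some (PySem.List.pyGetD pl (i-1) 0)) (some loc)) = false
      then output_list
      else if PySem.Chars.isIn "<output>".toList
                (PySem.Chars.slice cs (some (PySem.List.pyGetD pl (i-1) 0)) (some loc)) then
        let my_output := PySem.Chars.strip
          (PySem.Chars.slice cs (some (PySem.List.pyGetD pl (i-1) 0 + 9)) (some loc))
        let my_output := if PySem.Chars.isIn "_____event".toList my_output then
            PySem.Chars.strip (PySem.Chars.slice my_output (some 0)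
              (some (PySem.Chars.find my_output "_____event".toList)))
          else my_output
        if my_output.length > 0 then output_list ++ [String.ofList my_output] else output_list
      else output_list) acc
    = pvChainA cs (pl.getD (k-1) 0) d acc := by
  intro d
  induction d with
  | nil => intro k acc _ _; rfl
  | cons e rest ih =>
    intro k acc hk hd
    have hklen : k < pl.length := by
      by_contra hc
      rw [List.drop_eq_nil_of_le (by omega)] at hd
      simp at hd
    have hrest : rest = pl.drop (k+1) := by
      have h1 : (pl.drop k).drop 1 = pl.drop (k + 1) := List.drop_drop
      rw [← hd] at h1
      simpa using h1
    have hget : pl.getD k 0 = e := by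
      have h1 : (pl.drop k)[0]? = pl[k + 0]? := List.getElem?_drop
      rw [← hd] at h1
      simp only [List.getElem?_cons_zero, Nat.add_zero] at h1
      rw [List.getD_eq_getElem?_getD, ← h1]
      rfl
    have hlast : ((k:Int) = (pl.length : Int) - 1) ↔ (rest.isEmpty = true) := by
      rw [hrest, List.isEmpty_iff, List.drop_eq_nil_iff]
      omega
    rw [show PySem.List.enumerate (e::rest) (k : Int)
        = ((k : Int), e) :: PySem.List.enumerate rest ((k : Int) + 1) from rfl,
      List.foldl_cons]
    simp only
    rw [if_neg (by simp; omega)]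
    rw [show (k : Int) - 1 = (((k-1 : Nat)) : Int) by omega, PySem.List.pyGetD_natCast]
    simp only [hlast]
    rw [show (k : Int) + 1 = (((k+1 : Nat)) : Int) by omega]
    rw [ih (k+1) _ (by omega) hrest]
    simp only [Nat.add_sub_cancel, hget]
    rfl

-- ===== the B side: state machine ⟶ pvChainB =====

def pvSmStep (cs : List Char) (st : List String × Option Nat) (i : Nat) : List String × Option Nat :=
  if PySem.Chars.startswith (cs.drop i) "<line>".toList then
    match st.2 with
    | some p => (pvFlush cs p i st.1, none)
    | none => st
  else if PySem.Chars.startswith (cs.drop i) "<output>".toList then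
    match st.2 with
    | some p => (pvFlush cs p i st.1, some i)
    | none => (st.1, some i)
  else st

def pvFinal (cs : List Char) (st : List String × Option Nat) : List String :=
  match st.2 with
  | some p =>
    if PySem.Chars.isIn "</state>".toList (PySem.Chars.slice cs (some (p : Int)) none) then
      pvFlush cs p cs.length st.1
    else st.1
  | none => st.1

lemma pvAltEq (text : String) :
    get_output_from_trace_alt text
      = pvFinal text.toList ((List.range text.toList.length).foldl (pvSmStep text.toList) ([], none)) := rfl

lemma pvSliceFrom (cs : List Char) (p : Nat) :
    PySem.Chars.slice cs (some (p : Int)) none = cs.drop p := by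
  rw [PySem.Chars.slice_eq_listSlice, PySem.List.slice_from cs (Int.natCast_nonneg p)]
  simp

lemma pvLine_not_out {cs : List Char} {q : Nat}
    (h : PySem.Chars.startswith (cs.drop q) "<line>".toList = true) :
    PySem.Chars.startswith (cs.drop q) "<output>".toList = false := by
  rw [PySem.Chars.startswith_iff] at h
  by_contra hc
  simp only [Bool.not_eq_false, PySem.Chars.startswith_iff] at hc
  obtain ⟨t1, h1⟩ := h
  obtain ⟨t2, h2⟩ := hc
  have h3 : ("<line>".toList ++ t1)[1]? = ("<output>".toList ++ t2)[1]? := by rw [h1, h2]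
  rw [List.getElem?_append_left (by decide), List.getElem?_append_left (by decide)] at h3
  exact absurd h3 (by decide)

lemma pvStepB_skip {cs : List Char} {q : Nat}
    (h : PySem.Chars.startswith (cs.drop q) "<output>".toList = false)
    (e : Nat) (a : List String) : pvStepB cs q e a = a := by
  unfold pvStepB
  rw [h]
  simp

lemma pvSm_skip {cs : List Char} {x : Nat}
    (h1 : PySem.Chars.startswith (cs.drop x) "<line>".toList = false)
    (h2 : PySem.Chars.startswith (cs.drop x) "<output>".toList = false)
    (st : List String × Option Nat) : pvSmStep cs st x = st := by
  unfold pvSmStep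
  rw [h1, h2]
  simp

lemma pvSm_line_none {cs : List Char} {q : Nat}
    (h : PySem.Chars.startswith (cs.drop q) "<line>".toList = true)
    (acc : List String) : pvSmStep cs (acc, none) q = (acc, none) := by
  unfold pvSmStep
  rw [h]
  simp

lemma pvSm_line_some {cs : List Char} {q : Nat}
    (h : PySem.Chars.startswith (cs.drop q) "<line>".toList = true)
    (acc : List String) (p : Nat) :
    pvSmStep cs (acc, some p) q = (pvFlush cs p q acc, none) := by
  unfold pvSmStep
  rw [h]
  simp

lemma pvSm_out_none {cs : List Char} {q : Nat}
    (hl : PySem.Chars.startswith (cs.drop q) "<line>".toList = false)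
    (ho : PySem.Chars.startswith (cs.drop q) "<output>".toList = true)
    (acc : List String) : pvSmStep cs (acc, none) q = (acc, some q) := by
  unfold pvSmStep
  rw [hl, ho]
  simp

lemma pvSm_out_some {cs : List Char} {q : Nat}
    (hl : PySem.Chars.startswith (cs.drop q) "<line>".toList = false)
    (ho : PySem.Chars.startswith (cs.drop q) "<output>".toList = true)
    (acc : List String) (p : Nat) :
    pvSmStep cs (acc, some p) q = (pvFlush cs p q acc, some q) := by
  unfold pvSmStep
  rw [hl, ho]
  simp

lemma pvMachine (cs : List Char) :
    ∀ (l : List Nat), (∀ j ∈ l, pvTag cs j = true) →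
    (∀ acc, pvFinal cs (l.foldl (pvSmStep cs) (acc, none)) = pvChainB cs l acc) ∧
    (∀ acc p, PySem.Chars.startswith (cs.drop p) "<output>".toList = true →
      pvFinal cs (l.foldl (pvSmStep cs) (acc, some p)) = pvChainB cs (p :: l) acc) := by
  intro l
  induction l with
  | nil =>
    intro _
    refine ⟨fun acc => rfl, fun acc p hp => ?_⟩
    show (if PySem.Chars.isIn "</state>".toList
          (PySem.Chars.slice cs (some ((p : Nat) : Int)) none) = true then
        pvFlush cs p cs.length acc else acc)
      = pvStepB cs p cs.length acc
    unfold pvStepB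
    rw [hp, if_pos rfl, pvSliceFrom]
    cases hst : PySem.Chars.isIn "</state>".toList (cs.drop p) with
    | false => rw [if_neg (by simp), if_pos ⟨rfl, rfl⟩]
    | true => rw [if_pos rfl, if_neg (by simp)]
  | cons q rest ih =>
    intro hl
    have hq := hl q List.mem_cons_self
    obtain ⟨ihn, ihs⟩ := ih (fun j hj => hl j (List.mem_cons_of_mem _ hj))
    have hqlt : q < cs.length := pvTag_lt hq
    constructor
    · intro acc
      rw [List.foldl_cons]
      by_cases hline : PySem.Chars.startswith (cs.drop q) "<line>".toList = true
      · have hout := pvLine_not_out hline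
        rw [pvSm_line_none hline acc, ihn acc]
        show pvChainB cs rest acc = pvChainB cs rest (pvStepB cs q (pvNext cs.length rest) acc)
        rw [pvStepB_skip hout]
      · have hlf : PySem.Chars.startswith (cs.drop q) "<line>".toList = false := by
          simpa using hline
        have hout : PySem.Chars.startswith (cs.drop q) "<output>".toList = true := by
          have h := hq
          simp only [pvTag, Bool.or_eq_true] at h
          tauto
        rw [pvSm_out_none hlf hout acc]
        exact ihs acc q hout
    · intro acc p hp
      rw [List.foldl_cons]
      have h1 : pvStepB cs p (pvNext cs.length (q :: rest)) acc = pvFlush cs p q acc := by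
        show pvStepB cs p q acc = pvFlush cs p q acc
        unfold pvStepB
        rw [hp, if_pos rfl, if_neg (by rintro ⟨h, -⟩; omega)]
      by_cases hline : PySem.Chars.startswith (cs.drop q) "<line>".toList = true
      · have hout := pvLine_not_out hline
        rw [pvSm_line_some hline acc p, ihn _]
        show pvChainB cs rest (pvFlush cs p q acc)
          = pvChainB cs rest (pvStepB cs q (pvNext cs.length rest)
              (pvStepB cs p (pvNext cs.length (q :: rest)) acc))
        rw [h1, pvStepB_skip hout]
      · have hlf : PySem.Chars.startswith (cs.drop q) "<line>".toList = false := by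
          simpa using hline
        have hout : PySem.Chars.startswith (cs.drop q) "<output>".toList = true := by
          have h := hq
          simp only [pvTag, Bool.or_eq_true] at h
          tauto
        rw [pvSm_out_some hlf hout acc p, ihs _ q hout]
        show pvChainB cs (q :: rest) (pvFlush cs p q acc)
          = pvChainB cs (q :: rest) (pvStepB cs p (pvNext cs.length (q :: rest)) acc)
        rw [h1]

lemma pvAlt_eq_chain (cs : List Char) :
    pvFinal cs ((List.range cs.length).foldl (pvSmStep cs) ([], none))
      = pvChainB cs (pvOccs cs) [] := by
  have hfold : (List.range cs.length).foldl (pvSmStep cs) (([] : List String), (none : Option Nat))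
      = (pvOccs cs).foldl (pvSmStep cs) ([], none) := by
    rw [pvOccs, List.foldl_filter]
    refine PySem.List.foldl_congr_mem _ _ _ _ (fun acc x _ => ?_)
    by_cases h : pvTag cs x = true
    · rw [if_pos h]
    · rw [if_neg h]
      have h2 : PySem.Chars.startswith (cs.drop x) "<line>".toList = false
          ∧ PySem.Chars.startswith (cs.drop x) "<output>".toList = false := by
        rw [Bool.not_eq_true] at h
        simpa [pvTag] using h
      rw [pvSm_skip h2.1 h2.2]
  rw [hfold]
  exact (pvMachine cs (pvOccs cs) (fun j hj => pvMem_occs.mp hj)).1 []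

-- ===== VERDICT (by name: the statement is the Claim_ definition above) =====
theorem get_output_from_trace_spec : Claim_equal_get_output_from_trace := by
  intro text _
  unfold Spec_get_output_from_trace
  rw [pvAltEq, pvAlt_eq_chain]
  simp only [get_output_from_trace]
  generalize text.toList = cs
  rcases Nat.eq_zero_or_pos cs.length with hn | hn
  · rw [List.length_eq_zero_iff.mp hn]
    rfl
  · -- 0 < cs.length
    rw [pvFindAll_zero cs "<line>".toList (by decide),
        pvFindAll_zero cs "<output>".toList (by decide),
        pvSorted_eq cs hn]
    have hpair := pvOccs_pairwise cs
    have hminlt : ∀ (q : Nat) (t : List Nat), pvOccs cs = q :: t →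
        ∀ j, j < q → pvTag cs j = false := by
      intro q t hcs j hj
      by_contra hc
      simp only [Bool.not_eq_false] at hc
      have hmemj := pvMem_occs.mpr hc
      rw [hcs] at hmemj
      have hp := hpair
      rw [hcs] at hp
      rcases List.mem_cons.mp hmemj with rfl | hin
      · omega
      · have := (List.pairwise_cons.mp hp).1 j hin
        omega
    have hchain : ∀ (q : Nat) (t : List Nat) (acc : List String), pvOccs cs = q :: t →
        pvChainA cs (q : Int) (t.map (fun i : Nat => (i : Int)) ++ [(cs.length : Int)]) acc
          = pvChainB cs (q :: t) acc := by
      intro q t acc hcs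
      have hp := hpair
      rw [hcs] at hp
      obtain ⟨hqall, htp⟩ := List.pairwise_cons.mp hp
      refine pvChain_eq cs t q acc
        (pvTag_lt (pvMem_occs.mp (hcs ▸ List.mem_cons_self))) htp
        (fun j hj => ⟨hqall j hj, pvMem_occs.mp (hcs ▸ List.mem_cons_of_mem _ hj)⟩)
        (fun j h1 h2 htag => ?_)
      have := pvMem_occs.mpr htag
      rw [hcs] at this
      rcases List.mem_cons.mp this with rfl | hin
      · omega
      · exact hin
    by_cases h0 : pvTag cs 0 = true
    · -- 0 is itself a tag position: bnds = occs ++ [len], occs = 0 :: t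
      have hmem0 : (0:Nat) ∈ pvOccs cs := pvMem_occs.mpr h0
      cases hcs : pvOccs cs with
      | nil => rw [hcs] at hmem0; exact absurd hmem0 List.not_mem_nil
      | cons q t =>
        have hq0 : q = 0 := by
          rw [hcs] at hmem0 hpair
          rcases List.mem_cons.mp hmem0 with h | h
          · omega
          · have := (List.pairwise_cons.mp hpair).1 0 h
            omega
        subst hq0
        have hPs : (pvBnds cs).map (fun i : Nat => (i : Int))
            = (0:Int) :: (t.map (fun i : Nat => (i : Int)) ++ [(cs.length : Int)]) := by
          unfold pvBnds
          rw [if_pos h0, hcs]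
          simp
        rw [hPs]
        rw [show PySem.List.enumerate ((0:Int) :: (t.map (fun i : Nat => (i : Int))
              ++ [(cs.length : Int)])) 0
            = ((0:Int), (0:Int)) :: PySem.List.enumerate (t.map (fun i : Nat => (i : Int))
              ++ [(cs.length : Int)]) 1 from rfl,
          List.foldl_cons]
        have hA := fun acc => pvFoldA cs
          ((0:Int) :: (t.map (fun i : Nat => (i : Int)) ++ [(cs.length : Int)]))
          (t.map (fun i : Nat => (i : Int)) ++ [(cs.length : Int)]) 1 acc
          (by omega) (by simp)
        simp only [Nat.cast_one] at hA
        rw [hA]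
        rw [show ((0:Int) :: (t.map (fun i : Nat => (i : Int))
            ++ [(cs.length : Int)])).getD (1-1) 0 = ((0:Nat) : Int) by simp]
        rw [hcs] at hchain
        rw [hchain 0 t _ rfl]
        rfl
    · -- 0 is not a tag position: bnds = 0 :: occs ++ [len]
      have hPs : (pvBnds cs).map (fun i : Nat => (i : Int))
          = (0:Int) :: ((pvOccs cs).map (fun i : Nat => (i : Int)) ++ [(cs.length : Int)]) := by
        unfold pvBnds
        rw [if_neg h0]
        simp
      rw [hPs]
      rw [show PySem.List.enumerate ((0:Int) :: ((pvOccs cs).map (fun i : Nat => (i : Int))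
            ++ [(cs.length : Int)])) 0
          = ((0:Int), (0:Int)) :: PySem.List.enumerate ((pvOccs cs).map (fun i : Nat => (i : Int))
            ++ [(cs.length : Int)]) 1 from rfl,
        List.foldl_cons]
      have hA := fun acc => pvFoldA cs
        ((0:Int) :: ((pvOccs cs).map (fun i : Nat => (i : Int)) ++ [(cs.length : Int)]))
        ((pvOccs cs).map (fun i : Nat => (i : Int)) ++ [(cs.length : Int)]) 1 acc
        (by omega) (by simp)
      simp only [Nat.cast_one] at hA
      rw [hA]
      rw [show ((0:Int) :: ((pvOccs cs).map (fun i : Nat => (i : Int))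
          ++ [(cs.length : Int)])).getD (1-1) 0 = ((0:Nat) : Int) by simp]
      cases hcs : pvOccs cs with
      | nil =>
        simp only [List.map_nil, List.nil_append]
        rw [show pvChainA cs ((0:Nat) : Int) [(cs.length : Int)] _
            = pvStepA cs ((0:Nat) : Int) (cs.length : Int) true _ from rfl]
        rw [pvFirstSeg cs _ true (Bool.of_not_eq_true h0) le_rfl hn (fun j h1 h2 => by
          by_contra hc
          simp only [Bool.not_eq_false] at hc
          have := pvMem_occs.mpr hc
          rw [hcs] at this
          exact absurd this List.not_mem_nil)]
        rfl
      | cons q t =>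
        have hq := pvMem_occs.mp (hcs ▸ List.mem_cons_self)
        have hqpos : 0 < q := by
          rcases Nat.eq_zero_or_pos q with rfl | h
          · exact absurd hq h0
          · exact h
        simp only [List.map_cons, List.cons_append]
        rw [show pvChainA cs ((0:Nat) : Int) ((q:Int) :: (t.map (fun i : Nat => (i : Int))
              ++ [(cs.length : Int)])) _
            = pvChainA cs (q:Int) (t.map (fun i : Nat => (i : Int)) ++ [(cs.length : Int)])
                (pvStepA cs ((0:Nat) : Int) (q:Int)
                  ((t.map (fun i : Nat => (i : Int)) ++ [(cs.length : Int)]).isEmpty) _) from rfl]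
        rw [show ((t.map (fun i : Nat => (i : Int)) ++ [(cs.length : Int)]).isEmpty) = false by simp]
        rw [pvFirstSeg cs _ false (Bool.of_not_eq_true h0) (pvTag_lt hq).le hqpos (fun j _ hj => hminlt q t hcs j hj)]
        rw [hcs] at hchain
        rw [hchain q t _ rfl]
        rfl
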